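-- pv_equiv track=rewrite | github.com/oils-for-unix/oils | core/builtin.py | _ParseOptSpec
-- ===== SOURCE A (Python) =====
-- def _ParseOptSpec(spec_str):
--   spec = {}
--   i = 0
--   n = len(spec_str)
--   while True:
--     if i >= n:
--       break
--     c = spec_str[i]
--     key = '-' + c
--     spec[key] = False
--     i += 1
--     if i >= n:
--       break
--     # If the next character is :, change the value to True.
--     if spec_str[i] == ':':
--       spec[key] = True
--       i += 1
--   return spec
-- ===== SOURCE B (Python) =====
-- import re
--
-- def _ParseOptSpec(spec_str):
--   # Regex-tokenize: each option char with its optional trailing ':', then a dict comprehension.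
--   return {'-' + c: colon == ':' for c, colon in re.findall(r'([\s\S])(:?)', spec_str)}
-- ===== Notes on version B (the rewrite author's own statement) =====
-- stated objective: idiomatic
-- what changed: Replaces A's manual index-walking while-loop (with two break points and in-place value flip) by a regex that tokenizes the spec into (char, optional-colon) pairs consumed by a single dict comprehension.
import Mathlib
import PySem

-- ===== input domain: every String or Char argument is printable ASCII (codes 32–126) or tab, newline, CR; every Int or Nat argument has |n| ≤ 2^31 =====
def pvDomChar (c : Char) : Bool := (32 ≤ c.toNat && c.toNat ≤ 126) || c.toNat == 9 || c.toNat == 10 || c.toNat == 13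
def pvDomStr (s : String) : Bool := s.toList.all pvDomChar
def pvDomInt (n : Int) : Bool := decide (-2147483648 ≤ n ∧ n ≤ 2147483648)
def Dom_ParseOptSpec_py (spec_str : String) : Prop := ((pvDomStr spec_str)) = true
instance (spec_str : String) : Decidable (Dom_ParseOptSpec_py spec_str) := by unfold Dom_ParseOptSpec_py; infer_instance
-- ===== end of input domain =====

-- B replaces A's index-walking while-loop by a regex tokenization into (char, optional-colon)
-- pairs folded into the dict by a comprehension (objective: idiomatic; same behaviour).

-- ===== PORT A =====
-- A's while-loop over index i: each step reads spec_str[i] (always in range, guarded by i < n),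
-- inserts '-'+c := False, then if the next char is ':' overwrites to True and skips it.
def ParseOptSpecA_loop (s : List Char) (n : Nat) (spec : PySem.Dict String Bool) (i : Nat) :
    PySem.Dict String Bool :=
  if h : i ≥ n then spec
  else
    let c := s.getD i ' '          -- spec_str[i], in range since i < n
    let key := "-" ++ String.mk [c]
    let spec := spec.insert key false
    if h2 : i + 1 ≥ n then spec
    else if s.getD (i + 1) ' ' = ':' then
      ParseOptSpecA_loop s n (spec.insert key true) (i + 2)
    else
      ParseOptSpecA_loop s n spec (i + 1)
termination_by n - i

def ParseOptSpec_py (spec_str : String) : List (String × Bool) :=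
  (ParseOptSpecA_loop spec_str.toList spec_str.length PySem.Dict.empty 0).items

-- ===== PORT B =====
-- re.findall(r'([\s\S])(:?)', spec_str): greedily pairs each char with an optional following ':'.
def ParseOptSpecB_tokenize : List Char → List (String × Bool)
  | [] => []
  | c :: ':' :: rest => ("-" ++ String.mk [c], true) :: ParseOptSpecB_tokenize rest
  | c :: rest => ("-" ++ String.mk [c], false) :: ParseOptSpecB_tokenize rest

def ParseOptSpec_py_alt (spec_str : String) : List (String × Bool) :=
  ((ParseOptSpecB_tokenize spec_str.toList).foldl
    (fun d kv => d.insert kv.1 kv.2) PySem.Dict.empty).items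

-- ===== PRECONDITION & SPEC =====
def Spec_ParseOptSpec_py (spec_str : String) (out : List (String × Bool)) : Prop := out = ParseOptSpec_py_alt spec_str
instance (spec_str : String) (out : List (String × Bool)) : Decidable (Spec_ParseOptSpec_py spec_str out) := by unfold Spec_ParseOptSpec_py; infer_instance

-- ===== CLAIM (what is proved, stated in full; the proofs are below) =====
def Claim_equal_ParseOptSpec_py : Prop := ∀ (spec_str : String), Dom_ParseOptSpec_py spec_str → Spec_ParseOptSpec_py spec_str (ParseOptSpec_py spec_str)

-- ===== LEMMAS AND PROOFS =====

-- A's loop from index i equals B's fold over the tokens of the suffix.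
theorem ParseOptSpecA_loop_eq (s : List Char) (spec : PySem.Dict String Bool) (i : Nat) :
    ParseOptSpecA_loop s s.length spec i =
      (ParseOptSpecB_tokenize (s.drop i)).foldl (fun d kv => d.insert kv.1 kv.2) spec := by
  by_cases h : i ≥ s.length
  · rw [ParseOptSpecA_loop, List.drop_eq_nil_of_le h]
    simp [h, ParseOptSpecB_tokenize]
  · push_neg at h
    have hdrop : s.drop i = s[i] :: s.drop (i + 1) := List.drop_eq_getElem_cons h
    have hget : s.getD i ' ' = s[i] := List.getD_eq_getElem s ' ' h
    rw [ParseOptSpecA_loop]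
    simp only [ge_iff_le, dif_neg (not_le.mpr h)]
    by_cases h2 : i + 1 ≥ s.length
    · have : s.drop (i + 1) = [] := List.drop_eq_nil_of_le h2
      rw [hdrop, this]
      simp only [ge_iff_le, dif_pos h2, hget]
      cases hc : s[i] <;> simp [ParseOptSpecB_tokenize]
    · push_neg at h2
      have hget2 : s.getD (i + 1) ' ' = s[i + 1] := List.getD_eq_getElem s ' ' h2
      have hdrop2 : s.drop (i + 1) = s[i + 1] :: s.drop (i + 2) := List.drop_eq_getElem_cons h2
      simp only [ge_iff_le, dif_neg (not_le.mpr h2), hget, hget2]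
      by_cases hc : s[i + 1] = ':'
      · rw [if_pos hc, ParseOptSpecA_loop_eq s _ (i + 2), hdrop, hdrop2, hc]
        simp [ParseOptSpecB_tokenize, PySem.Dict.insert_insert_self]
      · rw [if_neg hc, ParseOptSpecA_loop_eq s _ (i + 1), hdrop]
        rw [show ParseOptSpecB_tokenize (s[i] :: s.drop (i + 1)) =
              ("-" ++ String.mk [s[i]], false) :: ParseOptSpecB_tokenize (s.drop (i + 1)) by
          rw [hdrop2]
          cases hc2 : s[i + 1] <;> simp_all [ParseOptSpecB_tokenize]]
        simp [List.foldl]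
termination_by s.length - i

-- ===== VERDICT (by name: the statement is the Claim_ definition above) =====
theorem ParseOptSpec_py_spec : Claim_equal_ParseOptSpec_py := by
  intro s _
  unfold Spec_ParseOptSpec_py ParseOptSpec_py ParseOptSpec_py_alt
  rw [show s.length = s.toList.length by simp, ParseOptSpecA_loop_eq]
  rfl
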